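-- pv_equiv track=rewrite | github.com/Aaryan-R-S/Sem5-AC-Assignments | Assignment 1/Problem 3/Evidence.py | isOfPeriod
-- ===== SOURCE A (Python) =====
-- def isOfPeriod(s, period):
--     N = len(s)
--
--     for idx in range(1, period+1):
--         comp_with = s[idx-1]
--         j = idx - 1 + period
--         while j < N:
--             if s[j] != comp_with:
--                 return False
--             j += period
--
--     return True
-- ===== SOURCE B (Python) =====
-- def isOfPeriod(s, period):
--     if period <= 0:
--         return True
--     return s[period:] == s[:len(s)-period]
-- ===== Notes on version B (the rewrite author's own statement) =====
-- stated objective: simpler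
-- what changed: Replaces A's nested residue-class stride loops (each class compared against its first element with early return) by a single whole-string slice comparison s[period:] == s[:len(s)-period], with period <= 0 returning True as A's empty outer loop does; the slice comparison runs in C rather than an interpreted per-character loop.
import Mathlib
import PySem

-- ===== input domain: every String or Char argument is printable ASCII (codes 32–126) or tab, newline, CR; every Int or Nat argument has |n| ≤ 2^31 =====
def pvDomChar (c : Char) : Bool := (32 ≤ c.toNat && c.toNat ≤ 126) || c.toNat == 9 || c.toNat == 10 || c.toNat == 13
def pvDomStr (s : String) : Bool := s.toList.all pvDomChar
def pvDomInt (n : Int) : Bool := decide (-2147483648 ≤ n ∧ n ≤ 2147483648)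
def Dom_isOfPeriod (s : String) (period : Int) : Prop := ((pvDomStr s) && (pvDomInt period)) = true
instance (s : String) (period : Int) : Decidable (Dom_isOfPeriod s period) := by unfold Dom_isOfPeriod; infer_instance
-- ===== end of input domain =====

-- B replaces A's nested residue-class stride loops by one slice comparison s[period:] == s[:len(s)-period]; objective: simpler.
-- ===== PORT A =====
-- inner 'while j < N' loop; fuel = (N - j).toNat suffices since the loop is only
-- entered with period ≥ 1; on fuel exhaustion (unreachable from the entry point) returns true
def pvWhileA (l : List Char) (comp : Char) (N period : Int) : Nat → Int → Bool
  | 0, _ => true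
  | fuel+1, j =>
    if j < N then
      match PySem.List.pyGet? l j with
      | none => false                  -- IndexError (outside Pre_)
      | some c => if c ≠ comp then false else pvWhileA l comp N period fuel (j + period)
    else true

-- 'for idx in range(1, period+1)' with early 'return False'
def pvOuterA (l : List Char) (N period : Int) : List Int → Bool
  | [] => true
  | idx :: rest =>
    match PySem.List.pyGet? l (idx - 1) with
    | none => false                    -- IndexError on s[idx-1] (outside Pre_)
    | some comp =>
      if pvWhileA l comp N period (N - (idx - 1 + period)).toNat (idx - 1 + period) then
        pvOuterA l N period rest
      else false

def isOfPeriod (s : String) (period : Int) : Bool :=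
  let l := s.toList
  let N : Int := l.length
  pvOuterA l N period (PySem.List.pyRange 1 (period + 1) 1)

-- ===== PORT B =====
def isOfPeriod_alt (s : String) (period : Int) : Bool :=
  if period ≤ 0 then true
  else
    let l := s.toList
    let N : Int := l.length
    decide (PySem.List.slice l (some period) none = PySem.List.slice l none (some (N - period)))

-- ===== PRECONDITION & SPEC =====
-- Pre_ excludes exactly period > len(s), where the Python A raises IndexError on s[idx-1]
def Pre_isOfPeriod (s : String) (period : Int) : Prop := period ≤ (s.toList.length : Int)
instance (s : String) (period : Int) : Decidable (Pre_isOfPeriod s period) := by unfold Pre_isOfPeriod; infer_instance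
def pvWitness_isOfPeriod : String × Int := ("abaaba", 3)

def Spec_isOfPeriod (s : String) (period : Int) (out : Bool) : Prop := out = isOfPeriod_alt s period
instance (s : String) (period : Int) (out : Bool) : Decidable (Spec_isOfPeriod s period out) := by unfold Spec_isOfPeriod; infer_instance

-- ===== CLAIM (what is proved, stated in full; the proofs are below) =====
def Claim_equal_isOfPeriod : Prop := ∀ (s : String) (period : Int), Dom_isOfPeriod s period → Pre_isOfPeriod s period → Spec_isOfPeriod s period (isOfPeriod s period)

-- ===== LEMMAS AND PROOFS =====

-- inner while loop: true iff every element of the stride class {j + m*p} equals comp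
lemma pvWhileA_iff (l : List Char) (comp : Char) (p : Nat) (hp : 1 ≤ p) :
    ∀ (fuel j : Nat), l.length - j ≤ fuel →
      (pvWhileA l comp (l.length : Int) (p : Int) fuel (j : Int) = true ↔
        ∀ m : Nat, j + m * p < l.length → l[j + m * p]? = some comp) := by
  intro fuel
  induction fuel with
  | zero =>
    intro j hj
    simp only [pvWhileA]
    constructor
    · intro _ m hm; omega
    · intro _; trivial
  | succ fuel ih =>
    intro j hj
    simp only [pvWhileA]
    by_cases hlt : j < l.length
    · rw [if_pos (by exact_mod_cast hlt)]
      rw [PySem.List.pyGet?_natCast]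
      rw [List.getElem?_eq_getElem hlt]
      simp only [ne_eq]
      by_cases hc : l[j] = comp
      · rw [if_neg (by simp [hc])]
        have hcast : ((j : Int) + (p : Int)) = ((j + p : Nat) : Int) := by push_cast; ring
        rw [hcast, ih (j + p) (by omega)]
        constructor
        · intro h m hm
          cases m with
          | zero => simpa [List.getElem?_eq_getElem hlt, hc] using hm
          | succ m' =>
            have hle : (m' + 1) * p = m' * p + p := by ring
            have := h m' (by omega : (j + p) + m' * p < l.length)
            convert this using 2 <;> omega
        · intro h m hm
          have hle : (m + 1) * p = m * p + p := by ring
          have := h (m + 1) (by omega)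
          convert this using 2 <;> omega
      · rw [if_pos (by simp [hc])]
        constructor
        · intro h; cases h
        · intro h
          have := h 0 (by omega)
          simp [List.getElem?_eq_getElem hlt] at this
          exact absurd this hc
    · rw [if_neg (by exact_mod_cast hlt)]
      constructor
      · intro _ m hm; omega
      · intro _; trivial

-- outer loop over an arbitrary index list: true iff every index passes its class check
lemma pvOuterA_iff (l : List Char) (p : Int) (L : List Int) :
    pvOuterA l (l.length : Int) p L = true ↔
      ∀ idx ∈ L,
        ∃ comp, PySem.List.pyGet? l (idx - 1) = some comp ∧
          pvWhileA l comp (l.length : Int) p ((l.length : Int) - (idx - 1 + p)).toNat (idx - 1 + p) = true := by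
  induction L with
  | nil => simp [pvOuterA]
  | cons idx rest ih =>
    simp only [pvOuterA, List.mem_cons]
    cases hg : PySem.List.pyGet? l (idx - 1) with
    | none =>
      constructor
      · intro h; cases h
      · intro h
        obtain ⟨c, hc, -⟩ := h idx (Or.inl rfl)
        rw [hg] at hc; cases hc
    | some comp =>
      dsimp only
      by_cases hw : pvWhileA l comp (l.length : Int) p ((l.length : Int) - (idx - 1 + p)).toNat (idx - 1 + p) = true
      · rw [if_pos hw, ih]
        constructor
        · intro h i hi
          cases hi with
          | inl he => exact he ▸ ⟨comp, hg, hw⟩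
          | inr hm => exact h i hm
        · intro h i hi; exact h i (Or.inr hi)
      · rw [if_neg hw]
        constructor
        · intro h; cases h
        · intro h
          obtain ⟨c, hc, hcw⟩ := h idx (Or.inl rfl)
          rw [hg] at hc
          cases hc
          exact absurd hcw hw

-- adjacent property ↔ residue-class property
lemma chain_iff (l : List Char) (p : Nat) (hp : 1 ≤ p) :
    (∀ b : Nat, b < p → ∀ m : Nat, b + (m + 1) * p < l.length → l[b + (m + 1) * p]? = l[b]?) ↔
      (∀ i : Nat, p + i < l.length → l[p + i]? = l[i]?) := by
  constructor
  · intro h i hi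
    have hb' : i % p < p := Nat.mod_lt _ hp
    have hdecomp : i = i % p + (i / p) * p := by
      conv_lhs => rw [← Nat.div_add_mod i p]
      ring
    obtain ⟨b, q, hbq, hblt⟩ : ∃ b q, i = b + q * p ∧ b < p := ⟨_, _, hdecomp, hb'⟩
    subst hbq
    have e1 : p + (b + q * p) = b + (q + 1) * p := by ring
    have e2 : (q + 1) * p = q * p + p := by ring
    rw [e1, h b hblt q (by omega)]
    cases q with
    | zero => simp
    | succ m =>
      rw [h b hblt m (by omega)]
  · intro h b hb m
    induction m with
    | zero =>
      intro hlt
      have : b + 1 * p = p + b := by ring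
      rw [this, h b (by omega)]
    | succ m ih =>
      intro hlt
      have e1 : b + (m + 1 + 1) * p = p + (b + (m + 1) * p) := by ring
      have e2 : (m + 1 + 1) * p = (m + 1) * p + p := by ring
      rw [e1, h (b + (m + 1) * p) (by omega)]
      exact ih (by omega)

-- slice comparison in B expressed element-wise
lemma drop_eq_take_iff (l : List Char) (p : Nat) (hp : p ≤ l.length) :
    (l.drop p = l.take (l.length - p)) ↔
      (∀ i : Nat, p + i < l.length → l[p + i]? = l[i]?) := by
  rw [List.ext_getElem?_iff]
  constructor
  · intro h i hi
    have := h i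
    rw [List.getElem?_drop, List.getElem?_take] at this
    rw [if_pos (by omega)] at this
    exact this
  · intro h n
    rw [List.getElem?_drop, List.getElem?_take]
    by_cases hn : n < l.length - p
    · rw [if_pos hn]; exact h n (by omega)
    · rw [if_neg hn]
      exact List.getElem?_eq_none (by omega)

-- ===== VERDICT =====
theorem isOfPeriod_spec : Claim_equal_isOfPeriod := by
  intro s period _ hpre
  unfold Spec_isOfPeriod
  simp only [isOfPeriod, isOfPeriod_alt]
  unfold Pre_isOfPeriod at hpre
  by_cases hple : period ≤ 0
  · rw [if_pos hple]
    have hrange : PySem.List.pyRange 1 (period + 1) 1 = [] := by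
      simp [PySem.List.pyRange]; omega
    rw [hrange]
    rfl
  · rw [if_neg hple]
    obtain ⟨p, rfl⟩ : ∃ p : Nat, period = (p : Int) :=
      ⟨period.toNat, by omega⟩
    have hp : 1 ≤ p := by omega
    have hpN : p ≤ s.toList.length := by exact_mod_cast hpre
    set l := s.toList with hl
    -- B side: slices as drop/take
    have hBto : ((l.length : Int) - (p : Int)) = ((l.length - p : Nat) : Int) := by omega
    rw [PySem.List.slice_from_natCast, hBto, PySem.List.slice_to_natCast]
    -- reduce to iff of the two Bools
    rw [Bool.eq_iff_iff]
    rw [pvOuterA_iff, decide_eq_true_iff, drop_eq_take_iff l p hpN, ← chain_iff l p hp]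
    constructor
    · intro h b hb m hm
      have hmem : ((b : Int) + 1) ∈ PySem.List.pyRange 1 ((p : Int) + 1) 1 := by
        rw [PySem.List.mem_pyRange_one]; omega
      obtain ⟨comp, hcomp, hw⟩ := h ((b : Int) + 1) hmem
      have hidx : ((b : Int) + 1 - 1) = (b : Int) := by ring
      rw [hidx, PySem.List.pyGet?_natCast, List.getElem?_eq_getElem (by omega)] at hcomp
      cases hcomp
      have hj : ((b : Int) + 1 - 1 + (p : Int)) = ((b + p : Nat) : Int) := by push_cast; ring
      rw [hj] at hw
      have hfuel : (((l.length : Int)) - ((b + p : Nat) : Int)).toNat = l.length - (b + p) := by omega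
      rw [hfuel] at hw
      rw [pvWhileA_iff l _ p hp (l.length - (b + p)) (b + p) (by omega)] at hw
      have hmul1 : (m + 1) * p = m * p + p := by ring
      have := hw m (by omega)
      have he : b + (m + 1) * p = (b + p) + m * p := by ring
      rw [he, this, List.getElem?_eq_getElem (by omega)]
    · intro h idx hmem
      rw [PySem.List.mem_pyRange_one] at hmem
      obtain ⟨b, rfl⟩ : ∃ b : Nat, idx = (b : Int) + 1 :=
        ⟨(idx - 1).toNat, by omega⟩
      have hb : b < p := by omega
      have hidx : ((b : Int) + 1 - 1) = (b : Int) := by ring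
      refine ⟨l[b]'(by omega), ?_, ?_⟩
      · rw [hidx, PySem.List.pyGet?_natCast, List.getElem?_eq_getElem (by omega)]
      · have hj : ((b : Int) + 1 - 1 + (p : Int)) = ((b + p : Nat) : Int) := by push_cast; ring
        rw [hj]
        have hfuel : (((l.length : Int)) - ((b + p : Nat) : Int)).toNat = l.length - (b + p) := by omega
        rw [hfuel]
        rw [pvWhileA_iff l _ p hp (l.length - (b + p)) (b + p) (by omega)]
        intro m hm
        have he : (b + p) + m * p = b + (m + 1) * p := by ring
        have hmul : (m + 1) * p = m * p + p := by ring
        rw [he, h b hb m (by omega), List.getElem?_eq_getElem (by omega)]
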